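-- pv_equiv track=rewrite | github.com/thehalleyyoung/halley-labs | refinement-type-inference-dynamic-lang/implementation/src/domains/base.py | _compute_widen_points
-- ===== SOURCE A (Python) =====
-- from typing import (
--     Any,
--     Callable,
--     Dict,
--     FrozenSet,
--     Generic,
--     Hashable,
--     Iterable,
--     Iterator,
--     List,
--     Mapping,
--     Optional,
--     Protocol,
--     Set,
--     Tuple,
--     TypeVar,
--     Union,
--     runtime_checkable,
-- )
--
-- def _compute_widen_points(
--     succs: Dict[int, List[int]], preds: Dict[int, List[int]]
-- ) -> Set[int]:
--     """Heuristic: widen at loop heads (nodes with a back-edge)."""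
--     visited: Set[int] = set()
--     widen_pts: Set[int] = set()
--
--     def dfs(n: int, path: Set[int]) -> None:
--         if n in path:
--             widen_pts.add(n)
--             return
--         if n in visited:
--             return
--         visited.add(n)
--         path.add(n)
--         for s in succs.get(n, []):
--             dfs(s, path)
--         path.discard(n)
--
--     for start in succs:
--         dfs(start, set())
--     return widen_pts
-- ===== SOURCE B (Python) =====
-- def _compute_widen_points(succs, preds):
--     """Heuristic: widen at loop heads (nodes with a back-edge) — iterative DFS with an explicit frame stack."""
--     visited = set()
--     widen_pts = set()
--     for start in succs:
--         if start in visited: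
--             continue
--         visited.add(start)
--         path = {start}
--         stack = [(start, iter(succs.get(start, [])))]
--         while stack:
--             n, it = stack[-1]
--             pushed = False
--             for s in it:
--                 if s in path:
--                     widen_pts.add(s)
--                     continue
--                 if s in visited:
--                     continue
--                 visited.add(s)
--                 path.add(s)
--                 stack.append((s, iter(succs.get(s, []))))
--                 pushed = True
--                 break
--             if not pushed:
--                 path.discard(n)
--                 stack.pop()
--     return widen_pts
-- ===== Notes on version B (the rewrite author's own statement) =====
-- stated objective: alternative
-- what changed: The recursive DFS (nested dfs closure mutating visited/widen_pts) is replaced by an iterative DFS over an explicit stack of (node, remaining-successors) frames that resumes each suspended successor loop in place, reproducing the exact call/return order without recursion.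
import Mathlib
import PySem

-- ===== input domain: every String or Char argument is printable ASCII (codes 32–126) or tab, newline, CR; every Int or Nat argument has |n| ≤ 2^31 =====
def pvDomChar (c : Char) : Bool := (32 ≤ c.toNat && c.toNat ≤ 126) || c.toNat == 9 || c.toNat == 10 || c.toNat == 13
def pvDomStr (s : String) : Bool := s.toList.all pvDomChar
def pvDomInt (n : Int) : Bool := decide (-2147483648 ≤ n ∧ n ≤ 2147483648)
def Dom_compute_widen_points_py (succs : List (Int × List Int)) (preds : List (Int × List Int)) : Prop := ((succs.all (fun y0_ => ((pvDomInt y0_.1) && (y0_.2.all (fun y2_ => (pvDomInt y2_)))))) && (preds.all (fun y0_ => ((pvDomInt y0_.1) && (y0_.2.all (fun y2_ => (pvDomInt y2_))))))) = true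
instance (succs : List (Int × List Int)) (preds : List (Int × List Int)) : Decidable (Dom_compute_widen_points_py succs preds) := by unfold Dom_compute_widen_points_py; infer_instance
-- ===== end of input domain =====

-- B rewrites A's recursive back-edge DFS as an iterative DFS over an explicit stack of
-- (node, remaining-successors) frames — same exact traversal and widen set, different decomposition.

-- Shared depth bound used only as a termination fuel by both ports: the recursion/stack depth
-- is bounded by the number of distinct nodes (keys + successor entries), so this fuel is never
-- exhausted and the guard branches below are unreachable at the fuel the ports pass.
def pvFuel (succs : List (Int × List Int)) : Nat :=
  1 + succs.length + (succs.map (fun p => p.2.length)).sum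

-- ===== PORT A =====
-- dfs(n, path): recursion made total by a fuel argument (a guard only; see pvFuel above).
-- State threaded through the calls: (visited, widen_pts); `path` is passed down (the Python
-- `path.add(n)` / `path.discard(n)` bracket means each call sees its ancestors' path and
-- returns with the caller's path intact, so only (visited, widen_pts) must be returned).
def pvDfsA (d : PySem.Dict Int (List Int)) :
    Nat → Int → PySem.Set Int → PySem.Set Int × PySem.Set Int → PySem.Set Int × PySem.Set Int
  | fuel, n, path, st =>
    if PySem.Set.contains path n then (st.1, PySem.Set.add st.2 n)
    else if PySem.Set.contains st.1 n then st
    else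
      match fuel with
      | 0 => st
      | Nat.succ f =>
        List.foldl (fun a s => pvDfsA d f s (PySem.Set.add path n) a)
          (PySem.Set.add st.1 n, st.2) (PySem.Dict.getD d n [])

def compute_widen_points_py (succs : List (Int × List Int)) (preds : List (Int × List Int)) : List Int :=
  let d := PySem.Dict.ofList succs
  (List.foldl (fun st start => pvDfsA d (pvFuel succs) start PySem.Set.empty st)
    (PySem.Set.empty, PySem.Set.empty) (PySem.Dict.keys d)).2

-- ===== PORT B =====
-- Iterative DFS. A frame (n, ns, f) is the suspended loop over n's remaining successors ns;
-- f is the fuel available to each child pushed from this frame (a guard only, never hit at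
-- the fuel the port passes). Used for the termination measure of the stack machine:
def pvMaxSucc (d : PySem.Dict Int (List Int)) : Nat :=
  List.foldl max 0 ((PySem.Dict.values d).map List.length)

theorem pvLen_getD_le (d : PySem.Dict Int (List Int)) (k : Int) :
    (PySem.Dict.getD d k []).length ≤ pvMaxSucc d := by
  unfold pvMaxSucc
  rcases hf : PySem.Dict.get? d k with _ | v
  · simp [PySem.Dict.getD, hf]
  · have hv : v ∈ PySem.Dict.values d := by
      simp only [PySem.Dict.get?, Option.map_eq_some_iff] at hf
      obtain ⟨p, hp, hpv⟩ := hf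
      exact List.mem_map.mpr ⟨p, List.mem_of_find?_eq_some hp, hpv⟩
    have := (PySem.List.le_foldl_max ((PySem.Dict.values d).map List.length) 0).2
      v.length (List.mem_map_of_mem hv)
    simpa [PySem.Dict.getD, hf] using this

def pvRunB (d : PySem.Dict Int (List Int)) :
    List (Int × List Int × Nat) → PySem.Set Int → PySem.Set Int × PySem.Set Int → PySem.Set Int × PySem.Set Int
  | [], _, st => st
  | (n, [], _) :: tail, path, st => pvRunB d tail (PySem.Set.discard path n) st
  | (n, s :: rs, f) :: tail, path, st =>
    if PySem.Set.contains path s then pvRunB d ((n, rs, f) :: tail) path (st.1, PySem.Set.add st.2 s)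
    else if PySem.Set.contains st.1 s then pvRunB d ((n, rs, f) :: tail) path st
    else
      match f with
      | 0 => pvRunB d ((n, rs, 0) :: tail) path st
      | Nat.succ f' =>
        pvRunB d ((s, PySem.Dict.getD d s [], f') :: (n, rs, Nat.succ f') :: tail)
          (PySem.Set.add path s) (PySem.Set.add st.1 s, st.2)
  termination_by stack _ _ =>
    (stack.map (fun fr => (pvMaxSucc d + 2) ^ fr.2.2 * (1 + fr.2.1.length))).sum
  decreasing_by
  · rename_i f
    simp only [List.map_cons, List.sum_cons, List.length_nil]
    nlinarith [(Nat.pow_pos (show 0 < pvMaxSucc d + 2 by omega) : 0 < (pvMaxSucc d + 2) ^ f)]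
  · simp only [List.map_cons, List.sum_cons, List.length_cons]
    nlinarith [(Nat.pow_pos (show 0 < pvMaxSucc d + 2 by omega) : 0 < (pvMaxSucc d + 2) ^ f)]
  · simp only [List.map_cons, List.sum_cons, List.length_cons]
    nlinarith [(Nat.pow_pos (show 0 < pvMaxSucc d + 2 by omega) : 0 < (pvMaxSucc d + 2) ^ f)]
  · simp only [List.map_cons, List.sum_cons, List.length_cons]
    nlinarith [(Nat.pow_pos (show 0 < pvMaxSucc d + 2 by omega) : 0 < (pvMaxSucc d + 2) ^ (0 : Nat))]
  · have hlen := pvLen_getD_le d s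
    simp only [List.map_cons, List.sum_cons, List.length_cons, Nat.succ_eq_add_one, pow_succ]
    nlinarith [(Nat.pow_pos (show 0 < pvMaxSucc d + 2 by omega) : 0 < (pvMaxSucc d + 2) ^ f')]

def compute_widen_points_py_alt (succs : List (Int × List Int)) (preds : List (Int × List Int)) : List Int :=
  let d := PySem.Dict.ofList succs
  (List.foldl (fun st start =>
      if PySem.Set.contains st.1 start then st
      else
        pvRunB d [(start, PySem.Dict.getD d start [], pvFuel succs - 1)]
          (PySem.Set.add PySem.Set.empty start) (PySem.Set.add st.1 start, st.2))
    (PySem.Set.empty, PySem.Set.empty) (PySem.Dict.keys d)).2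

-- ===== PRECONDITION & SPEC =====
def Spec_compute_widen_points_py (succs : List (Int × List Int)) (preds : List (Int × List Int)) (out : List Int) : Prop := out = compute_widen_points_py_alt succs preds
instance (succs : List (Int × List Int)) (preds : List (Int × List Int)) (out : List Int) : Decidable (Spec_compute_widen_points_py succs preds out) := by unfold Spec_compute_widen_points_py; infer_instance

-- ===== CLAIM (what is proved, stated in full; the proofs are below) =====
def Claim_equal_compute_widen_points_py : Prop := ∀ (succs : List (Int × List Int)) (preds : List (Int × List Int)), Dom_compute_widen_points_py succs preds → Spec_compute_widen_points_py succs preds (compute_widen_points_py succs preds)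

-- ===== LEMMAS AND PROOFS =====

theorem pv_discard_add (p : PySem.Set Int) (s : Int) (h : PySem.Set.contains p s = false) :
    PySem.Set.discard (PySem.Set.add p s) s = p := by
  simp [PySem.Set.contains] at h
  simp [PySem.Set.discard, PySem.Set.add, PySem.Set.contains, h]
  intro a ha rfl; exact h ha

theorem pvDfsA_eq (d : PySem.Dict Int (List Int)) (fuel : Nat) (n : Int)
    (path : PySem.Set Int) (st : PySem.Set Int × PySem.Set Int) :
    pvDfsA d fuel n path st =
      if PySem.Set.contains path n then (st.1, PySem.Set.add st.2 n)
      else if PySem.Set.contains st.1 n then st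
      else
        match fuel with
        | 0 => st
        | Nat.succ f =>
          List.foldl (fun a s => pvDfsA d f s (PySem.Set.add path n) a)
            (PySem.Set.add st.1 n, st.2) (PySem.Dict.getD d n []) := by
  rw [pvDfsA.eq_def]

theorem pvRunB_nil (d : PySem.Dict Int (List Int)) (path : PySem.Set Int) (st : PySem.Set Int × PySem.Set Int) :
    pvRunB d [] path st = st := by
  rw [pvRunB.eq_def]

theorem pvRunB_pop (d : PySem.Dict Int (List Int)) (n : Int) (f : Nat) (tail : List (Int × List Int × Nat))
    (path : PySem.Set Int) (st : PySem.Set Int × PySem.Set Int) :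
    pvRunB d ((n, [], f) :: tail) path st = pvRunB d tail (PySem.Set.discard path n) st := by
  rw [pvRunB.eq_def]

theorem pvRunB_cons (d : PySem.Dict Int (List Int)) (n s : Int) (rs : List Int) (f : Nat)
    (tail : List (Int × List Int × Nat)) (path : PySem.Set Int) (st : PySem.Set Int × PySem.Set Int) :
    pvRunB d ((n, s :: rs, f) :: tail) path st =
      if PySem.Set.contains path s then pvRunB d ((n, rs, f) :: tail) path (st.1, PySem.Set.add st.2 s)
      else if PySem.Set.contains st.1 s then pvRunB d ((n, rs, f) :: tail) path st
      else
        match f with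
        | 0 => pvRunB d ((n, rs, 0) :: tail) path st
        | Nat.succ f' =>
          pvRunB d ((s, PySem.Dict.getD d s [], f') :: (n, rs, Nat.succ f') :: tail)
            (PySem.Set.add path s) (PySem.Set.add st.1 s, st.2) := by
  rw [pvRunB.eq_def]

-- The simulation invariant: running the machine with frame (n, ns, f) on top is running
-- the recursive dfs at fuel f on each s ∈ ns in order (with n's path on), then popping n.
theorem pv_sim (d : PySem.Dict Int (List Int)) (f : Nat) :
    ∀ (ns : List Int) (n : Int) (tail : List (Int × List Int × Nat))
      (path : PySem.Set Int) (st : PySem.Set Int × PySem.Set Int),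
      pvRunB d ((n, ns, f) :: tail) path st
        = pvRunB d tail (PySem.Set.discard path n)
            (List.foldl (fun a s => pvDfsA d f s path a) st ns) := by
  induction f using Nat.strong_induction_on with
  | _ f ihf =>
    intro ns n tail path st
    induction ns generalizing st with
    | nil => rw [pvRunB_pop, List.foldl_nil]
    | cons s rs ih =>
      rw [pvRunB_cons, List.foldl_cons]
      by_cases hp : PySem.Set.contains path s
      · rw [if_pos hp, ih]
        congr 2
        rw [pvDfsA_eq, if_pos hp]
      · rw [if_neg hp]
        by_cases hv : PySem.Set.contains st.1 s
        · rw [if_pos hv, ih]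
          congr 2
          rw [pvDfsA_eq, if_neg hp, if_pos hv]
        · rw [if_neg hv]
          cases f with
          | zero =>
            change pvRunB d ((n, rs, 0) :: tail) path st = _
            rw [ih]
            congr 2
            rw [pvDfsA_eq, if_neg hp, if_neg hv]
          | succ f' =>
            change pvRunB d ((s, PySem.Dict.getD d s [], f') :: (n, rs, f' + 1) :: tail)
              (PySem.Set.add path s) (PySem.Set.add st.1 s, st.2) = _
            rw [ihf f' (Nat.lt_succ_self f'), pv_discard_add path s (by simpa using hp), ih]
            congr 2
            rw [pvDfsA_eq, if_neg hp, if_neg hv]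

-- One outer-loop step of A equals one outer-loop step of B (fuel written as f+1).
theorem pv_step (d : PySem.Dict Int (List Int)) (f : Nat) (start : Int)
    (st : PySem.Set Int × PySem.Set Int) :
    pvDfsA d (f + 1) start PySem.Set.empty st
      = if PySem.Set.contains st.1 start then st
        else pvRunB d [(start, PySem.Dict.getD d start [], f)]
          (PySem.Set.add PySem.Set.empty start) (PySem.Set.add st.1 start, st.2) := by
  have hemp : PySem.Set.contains (PySem.Set.empty : PySem.Set Int) start = false := rfl
  rw [pvDfsA_eq, if_neg (by simp [PySem.Set.contains, PySem.Set.empty])]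
  by_cases hv : PySem.Set.contains st.1 start
  · rw [if_pos hv, if_pos hv]
  · rw [if_neg hv, if_neg hv,
      pv_sim d f (PySem.Dict.getD d start []) start []
        (PySem.Set.add PySem.Set.empty start) (PySem.Set.add st.1 start, st.2),
      pv_discard_add _ _ hemp]
    rw [pvRunB_nil]

-- ===== VERDICT (by name: the statement is the Claim_ definition above) =====
theorem compute_widen_points_py_spec : Claim_equal_compute_widen_points_py := by
  intro succs preds _
  unfold Spec_compute_widen_points_py compute_widen_points_py compute_widen_points_py_alt
  have hF : pvFuel succs = (pvFuel succs - 1) + 1 := by unfold pvFuel; omega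
  refine congrArg Prod.snd (PySem.List.foldl_congr_mem _ _ _ _ ?_)
  intro st start _
  conv_lhs => rw [hF]
  rw [pv_step]
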